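-- pv_equiv track=rewrite | github.com/Alexandrova1Tatiana/public-235 | 1234.py | checkered_board
-- ===== SOURCE A (Python) =====
-- def checkered_board(n):
--     if not isinstance(n, int) or n<=1:
--         return False
--     res=[]
--     if n%2==0:
--         for i in range(n):
--             temp=[]
--             for j in range(n):
--                 temp.append("□") if (i+j)%2==0 else temp.append("■")
--             res.append(" ".join(temp))
--         return "\n".join(res)
--     else:
--         for i in range(n):
--             temp=[]
--             for j in range(n):
--                 temp.append("■") if (i+j)%2==0 else temp.append("□")
--             res.append(" ".join(temp))
--         return "\n".join(res)
-- ===== SOURCE B (Python) =====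
-- def checkered_board(n):
--     if not isinstance(n, int) or n <= 1:
--         return False
--     c0, c1 = ("■", "□") if n % 2 else ("□", "■")
--     row0 = " ".join(c0 if j % 2 == 0 else c1 for j in range(n))
--     row1 = " ".join(c1 if j % 2 == 0 else c0 for j in range(n))
--     return "\n".join(row0 if i % 2 == 0 else row1 for i in range(n))
-- ===== Notes on version B (the rewrite author's own statement) =====
-- stated objective: faster
-- what changed: B picks the corner glyph once from n%2 and builds only two row template strings, joining n alternating references to them, instead of A's duplicated branch doing n*n per-cell (i+j)%2 appends.
-- outside the precondition, e.g. on checkered_board(1): A returns False, B returns False; on checkered_board(0): A returns False, B returns False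
import Mathlib
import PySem

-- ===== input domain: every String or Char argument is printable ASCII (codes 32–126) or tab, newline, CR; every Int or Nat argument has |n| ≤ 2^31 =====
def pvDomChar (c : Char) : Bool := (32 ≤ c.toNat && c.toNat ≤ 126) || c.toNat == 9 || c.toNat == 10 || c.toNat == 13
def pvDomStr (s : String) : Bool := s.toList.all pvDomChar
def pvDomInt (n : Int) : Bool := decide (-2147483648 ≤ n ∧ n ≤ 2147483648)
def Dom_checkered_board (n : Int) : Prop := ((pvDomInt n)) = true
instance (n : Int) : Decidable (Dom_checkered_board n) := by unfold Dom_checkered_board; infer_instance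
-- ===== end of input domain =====

-- B builds the board from two precomputed row templates chosen by parity (faster by a constant
-- factor: only 2 rows are materialised) instead of A's duplicated per-cell (i+j)%2 double loop;
-- equivalence is claimed on n ≥ 2 (elsewhere A returns False, not a string).

-- ===== PORT A =====
def checkered_board (n : Int) : String :=
  -- the 'not isinstance(n,int) or n<=1: return False' guard is excluded by Pre_ (A returns a bool there)
  if PySem.Int.mod n 2 = 0 then
    PySem.Str.join "\n" ((PySem.List.pyRange 0 n 1).map (fun i =>
      PySem.Str.join " " ((PySem.List.pyRange 0 n 1).map (fun j =>
        if PySem.Int.mod (i + j) 2 = 0 then "□" else "■"))))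
  else
    PySem.Str.join "\n" ((PySem.List.pyRange 0 n 1).map (fun i =>
      PySem.Str.join " " ((PySem.List.pyRange 0 n 1).map (fun j =>
        if PySem.Int.mod (i + j) 2 = 0 then "■" else "□"))))

-- ===== PORT B =====
def checkered_board_alt (n : Int) : String :=
  let c0 : String := if PySem.Int.mod n 2 ≠ 0 then "■" else "□"
  let c1 : String := if PySem.Int.mod n 2 ≠ 0 then "□" else "■"
  let row0 := PySem.Str.join " " ((PySem.List.pyRange 0 n 1).map (fun j =>
    if PySem.Int.mod j 2 = 0 then c0 else c1))
  let row1 := PySem.Str.join " " ((PySem.List.pyRange 0 n 1).map (fun j =>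
    if PySem.Int.mod j 2 = 0 then c1 else c0))
  PySem.Str.join "\n" ((PySem.List.pyRange 0 n 1).map (fun i =>
    if PySem.Int.mod i 2 = 0 then row0 else row1))

-- ===== PRECONDITION & SPEC =====
-- Pre_ excludes n ≤ 1, where A (and B) return the bool False instead of a string.
def Pre_checkered_board (n : Int) : Prop := 2 ≤ n
instance (n : Int) : Decidable (Pre_checkered_board n) := by unfold Pre_checkered_board; infer_instance
def pvWitness_checkered_board : Int := (2)

def Spec_checkered_board (n : Int) (out : String) : Prop := out = checkered_board_alt n
instance (n : Int) (out : String) : Decidable (Spec_checkered_board n out) := by unfold Spec_checkered_board; infer_instance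

-- ===== CLAIM (what is proved, stated in full; the proofs are below) =====
def Claim_equal_checkered_board : Prop := ∀ (n : Int), Dom_checkered_board n → Pre_checkered_board n → Spec_checkered_board n (checkered_board n)

-- ===== LEMMAS AND PROOFS =====

-- one row of A equals the matching template row of B
theorem pv_row_eq (a b : String) (i : Int) (R : List Int) :
    R.map (fun j => if (i + j) % 2 = 0 then a else b) =
      (if i % 2 = 0
        then R.map (fun j => if j % 2 = 0 then a else b)
        else R.map (fun j => if j % 2 = 0 then b else a)) := by
  split_ifs with hi <;>
    exact List.map_congr_left (fun j _ => by split_ifs <;> first | rfl | omega)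

-- ===== VERDICT (by name: the statement is the Claim_ definition above) =====
theorem checkered_board_spec : Claim_equal_checkered_board := by
  intro n _ hpre
  unfold Pre_checkered_board at hpre
  unfold Spec_checkered_board checkered_board checkered_board_alt
  have hm : ∀ a : Int, PySem.Int.mod a 2 = a % 2 :=
    fun a => PySem.Int.mod_eq_emod_of_pos (by omega)
  simp only [hm]
  by_cases hn : n % 2 = 0
  · simp only [hn, if_neg (by omega : ¬ ((0:Int) ≠ 0))]
    refine congrArg (PySem.Str.join "\n") (List.map_congr_left fun i _ => ?_)
    rw [pv_row_eq, apply_ite (PySem.Str.join " ")]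
  · simp only [if_neg hn, if_pos hn]
    refine congrArg (PySem.Str.join "\n") (List.map_congr_left fun i _ => ?_)
    rw [pv_row_eq, apply_ite (PySem.Str.join " ")]
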